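-- pv_equiv track=rewrite | github.com/LouisJeanneau/AdventOfCode | Python/2025/2025_day11.py | dfs_mem
-- ===== SOURCE A (Python) =====
-- def dfs_mem(node_explored, successors_dict, value_dict: dict):
--     if node_explored in value_dict:
--         return value_dict.get(node_explored)
--     r = 0
--     for successor in successors_dict.get(node_explored):
--         r += dfs_mem(successor, successors_dict, value_dict)
--     value_dict[node_explored] = r
--     return r
-- ===== SOURCE B (Python) =====
-- def dfs_mem(node_explored, successors_dict, value_dict: dict):
--     # Bottom-up rounds instead of memoized recursion: repeatedly resolve every
--     # node whose successors all have cached values, until the queried node is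
--     # cached.  (Like A, this caches intermediate results into value_dict.)
--     while node_explored not in value_dict:
--         progressed = False
--         for node, succs in successors_dict.items():
--             if node not in value_dict and all(s in value_dict for s in succs):
--                 value_dict[node] = sum(value_dict[s] for s in succs)
--                 progressed = True
--         if not progressed:
--             raise ValueError("unresolvable: cyclic or missing successor list")
--     return value_dict[node_explored]
-- ===== Notes on version B (the rewrite author's own statement) =====
-- stated objective: alternative
-- what changed: Replaces the memoized top-down recursion by an iterative bottom-up fixpoint: repeated passes over successors_dict resolve every node whose successors are already cached until the queried node is cached, with no recursion at all (return-value equivalence; both cache into value_dict, but the set of keys written may differ).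
import Mathlib
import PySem

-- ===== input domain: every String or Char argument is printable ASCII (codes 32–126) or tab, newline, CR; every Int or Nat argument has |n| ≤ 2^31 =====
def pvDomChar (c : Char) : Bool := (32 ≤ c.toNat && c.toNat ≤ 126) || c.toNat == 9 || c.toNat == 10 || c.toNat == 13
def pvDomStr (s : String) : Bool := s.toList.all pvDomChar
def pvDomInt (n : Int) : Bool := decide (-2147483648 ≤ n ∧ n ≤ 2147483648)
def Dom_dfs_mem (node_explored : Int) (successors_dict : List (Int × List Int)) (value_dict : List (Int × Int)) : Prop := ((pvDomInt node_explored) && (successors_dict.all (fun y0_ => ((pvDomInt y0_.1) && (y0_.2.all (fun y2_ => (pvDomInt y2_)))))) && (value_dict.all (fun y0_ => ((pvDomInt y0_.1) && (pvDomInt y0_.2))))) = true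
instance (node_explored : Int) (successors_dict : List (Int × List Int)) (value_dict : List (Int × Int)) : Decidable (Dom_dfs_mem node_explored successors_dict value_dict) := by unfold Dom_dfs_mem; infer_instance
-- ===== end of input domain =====

-- B replaces A's memoized recursion by an iterative bottom-up fixpoint (no recursion); the
-- equivalence is about the RETURN value: both mutate value_dict, but may cache different keys.

-- ===== PORT A =====
-- A, literally: memoized recursion.  The Nat fuel is only a termination guard for Lean:
-- Python A has no bound (it recurses forever on live cycles, which Pre_ excludes), and under
-- Pre_ the fuel `length + 2` is proved never to run out.
def dfsA (sd : PySem.Dict Int (List Int)) : Nat → Int → PySem.Dict Int Int → Int × PySem.Dict Int Int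
  | 0, _, d => (0, d)
  | fuel + 1, n, d =>
    if d.contains n then (d.getD n 0, d)          -- `if node_explored in value_dict: return value_dict.get(node_explored)`
    else
      -- `r = 0; for successor in successors_dict.get(node_explored): r += dfs_mem(...)`
      -- (a missing successor list raises TypeError in Python; Pre_ excludes those inputs)
      let p := (sd.getD n []).foldl
        (fun (acc : Int × PySem.Dict Int Int) s =>
          let q := dfsA sd fuel s acc.2
          (acc.1 + q.1, q.2)) (0, d)
      (p.1, p.2.insert n p.1)                     -- `value_dict[node_explored] = r; return r`

def dfs_mem (node_explored : Int) (successors_dict : List (Int × List Int)) (value_dict : List (Int × Int)) : Int :=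
  (dfsA (PySem.Dict.ofList successors_dict) (successors_dict.length + 2) node_explored
    (PySem.Dict.ofList value_dict)).1

-- ===== PORT B =====
-- `sum(value_dict[s] for s in succs)`
def sumCached (d : PySem.Dict Int Int) (ss : List Int) : Int :=
  ss.foldl (fun a s => a + d.getD s 0) 0

-- one `for node, succs in successors_dict.items():` pass; the Bool is `progressed`
def roundB (items : List (Int × List Int)) (st : PySem.Dict Int Int × Bool) :
    PySem.Dict Int Int × Bool :=
  items.foldl
    (fun st kv =>
      if ¬ st.1.contains kv.1 ∧ kv.2.all st.1.contains then
        (st.1.insert kv.1 (sumCached st.1 kv.2), true)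
      else st) st

-- the `while node_explored not in value_dict` loop.  Fuel is a termination guard only:
-- under Pre_ it never runs out; where Python B raises ValueError (no progress) the port
-- returns 0, and Pre_ excludes those inputs.
def runB (sd : PySem.Dict Int (List Int)) : Nat → Int → PySem.Dict Int Int → Int
  | 0, _, _ => 0
  | fuel + 1, n, d =>
    if d.contains n then d.getD n 0               -- `return value_dict[node_explored]`
    else
      let st := roundB sd.items (d, false)
      if st.2 then runB sd fuel n st.1 else 0     -- `if not progressed: raise ValueError`

def dfs_mem_alt (node_explored : Int) (successors_dict : List (Int × List Int)) (value_dict : List (Int × Int)) : Int :=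
  runB (PySem.Dict.ofList successors_dict) (successors_dict.length + 2) node_explored
    (PySem.Dict.ofList value_dict)

-- ===== PRECONDITION & SPEC =====
-- Graph layer used by Pre_: the nodes the Python recursion actually visits.  A node is
-- "live" if it has no cached value yet; recursion expands exactly the live nodes.
def pvLsucc (sd : PySem.Dict Int (List Int)) (vd : PySem.Dict Int Int) (n : Int) : List Int :=
  if vd.contains n then [] else sd.getD n []

def pvStep (sd : PySem.Dict Int (List Int)) (vd : PySem.Dict Int Int) (T : List Int) : List Int :=
  T.foldl (fun acc m => (pvLsucc sd vd m).foldl (fun a s => PySem.Set.add a s) acc) T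

def pvIter (sd : PySem.Dict Int (List Int)) (vd : PySem.Dict Int Int) : Nat → List Int → List Int
  | 0, T => T
  | k + 1, T => pvStep sd vd (pvIter sd vd k T)

-- enough iterations to reach the reachability fixpoint
def pvN (S : List (Int × List Int)) : Nat := (S.flatMap Prod.snd).length + 2

def pvClosure (node : Int) (S : List (Int × List Int)) (V : List (Int × Int)) : List Int :=
  pvIter (PySem.Dict.ofList S) (PySem.Dict.ofList V) (pvN S) [node]

def pvReach (n : Int) (S : List (Int × List Int)) (V : List (Int × Int)) : List Int :=
  pvIter (PySem.Dict.ofList S) (PySem.Dict.ofList V) (pvN S)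
    (PySem.Set.ofList (pvLsucc (PySem.Dict.ofList S) (PySem.Dict.ofList V) n))

-- Pre_: exactly the inputs on which Python A returns: every uncached node the recursion can
-- reach has a successor list (else A raises TypeError on iterating None), and no uncached
-- reachable node lies on a cycle (else A recurses forever / RecursionError).
def Pre_dfs_mem (node_explored : Int) (successors_dict : List (Int × List Int)) (value_dict : List (Int × Int)) : Prop :=
  ∀ n ∈ pvClosure node_explored successors_dict value_dict,
    (PySem.Dict.ofList value_dict).contains n = false →
      (PySem.Dict.ofList successors_dict).contains n = true ∧
      n ∉ pvReach n successors_dict value_dict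

instance (node_explored : Int) (successors_dict : List (Int × List Int)) (value_dict : List (Int × Int)) : Decidable (Pre_dfs_mem node_explored successors_dict value_dict) := by
  unfold Pre_dfs_mem; infer_instance

def pvWitness_dfs_mem : Int × (List (Int × List Int)) × (List (Int × Int)) :=
  (1, [(1, [2, 3]), (2, [3])], [(3, 5)])

def Spec_dfs_mem (node_explored : Int) (successors_dict : List (Int × List Int)) (value_dict : List (Int × Int)) (out : Int) : Prop := out = dfs_mem_alt node_explored successors_dict value_dict
instance (node_explored : Int) (successors_dict : List (Int × List Int)) (value_dict : List (Int × Int)) (out : Int) : Decidable (Spec_dfs_mem node_explored successors_dict value_dict out) := by unfold Spec_dfs_mem; infer_instance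

-- ===== CLAIM (what is proved, stated in full; the proofs are below) =====
def Claim_equal_dfs_mem : Prop := ∀ (node_explored : Int) (successors_dict : List (Int × List Int)) (value_dict : List (Int × Int)), Dom_dfs_mem node_explored successors_dict value_dict → Pre_dfs_mem node_explored successors_dict value_dict → Spec_dfs_mem node_explored successors_dict value_dict (dfs_mem node_explored successors_dict value_dict)

-- ===== LEMMAS AND PROOFS =====

-- ---- generic dictionary facts ----
theorem pv_contains_iff_some {κ ν : Type} [BEq κ] (d : PySem.Dict κ ν) (k : κ) :
    d.contains k = true ↔ ∃ v, d.get? k = some v := by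
  rw [PySem.Dict.contains_eq_isSome_get?]
  cases d.get? k <;> simp

theorem pv_items_update_subset {κ ν : Type} [BEq κ]
    (ps : List (κ × ν)) (d : PySem.Dict κ ν) (p : κ × ν)
    (h : p ∈ (d.update ps).items) : p ∈ d.items ∨ p ∈ ps := by
  induction ps generalizing d with
  | nil => exact Or.inl h
  | cons q t ih =>
    rcases ih (d.insert q.1 q.2) (by simpa [PySem.Dict.update] using h) with h' | h'
    · rw [PySem.Dict.items_insert] at h'
      by_cases hc : d.contains q.1 = true
      · simp only [hc, if_true, List.mem_map] at h'
        obtain ⟨r, hr, hre⟩ := h'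
        by_cases hrq : (r.1 == q.1) = true
        · simp only [hrq, if_true] at hre
          right
          rw [← hre]
          exact List.mem_cons_self ..
        · rw [if_neg hrq] at hre; left; rw [← hre]; exact hr
      · rw [if_neg hc] at h'
        rcases List.mem_append.1 h' with h' | h'
        · exact Or.inl h'
        · right
          rw [List.mem_singleton.1 h']
          exact List.mem_cons_self ..
    · right; right; exact h'


theorem pv_items_ofList_subset {κ ν : Type} [BEq κ]
    (ps : List (κ × ν)) (p : κ × ν) (h : p ∈ (PySem.Dict.ofList ps).items) : p ∈ ps := by
  have := pv_items_update_subset ps PySem.Dict.empty p h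
  simpa [PySem.Dict.empty] using this


theorem pv_items_ofList_length_le {κ ν : Type} [BEq κ] (ps : List (κ × ν)) :
    (PySem.Dict.ofList ps).items.length ≤ ps.length := by
  have key : ∀ (qs : List (κ × ν)) (d : PySem.Dict κ ν),
      (d.update qs).items.length ≤ d.items.length + qs.length := by
    intro qs
    induction qs with
    | nil => intro d; simp [PySem.Dict.update]
    | cons q t ih =>
      intro d
      have h1 : (d.insert q.1 q.2).items.length ≤ d.items.length + 1 := by
        rw [PySem.Dict.items_insert]
        by_cases hc : d.contains q.1 = true <;> simp [hc]
      have h2 := ih (d.insert q.1 q.2)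
      calc (d.update (q :: t)).items.length
          = ((d.insert q.1 q.2).update t).items.length := by
            simp [PySem.Dict.update]
        _ ≤ (d.insert q.1 q.2).items.length + t.length := h2
        _ ≤ d.items.length + 1 + t.length := by omega
        _ = d.items.length + (q :: t).length := by simp; omega
  have := key ps PySem.Dict.empty
  simpa [PySem.Dict.empty] using this


-- ---- set-fold facts ----
theorem pv_mem_foldl_add (l acc : List Int) (x : Int) :
    x ∈ l.foldl (fun a s => PySem.Set.add a s) acc ↔ x ∈ acc ∨ x ∈ l := by
  induction l generalizing acc with
  | nil => simp
  | cons h t ih =>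
    simp only [List.foldl_cons, ih, PySem.Set.mem_add, List.mem_cons]
    tauto


theorem pv_nodup_foldl_add (l acc : List Int) (h : acc.Nodup) :
    (l.foldl (fun a s => PySem.Set.add a s) acc).Nodup := by
  induction l generalizing acc with
  | nil => exact h
  | cons x t ih => exact ih _ (PySem.Set.nodup_add _ _ h)


-- ---- step/iter facts ----
theorem pv_mem_step (sd : PySem.Dict Int (List Int)) (vd : PySem.Dict Int Int)
    (T : List Int) (x : Int) :
    x ∈ pvStep sd vd T ↔ x ∈ T ∨ ∃ m ∈ T, x ∈ pvLsucc sd vd m := by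
  unfold pvStep
  have key : ∀ (L acc : List Int),
      x ∈ L.foldl (fun acc m => (pvLsucc sd vd m).foldl (fun a s => PySem.Set.add a s) acc) acc ↔
        x ∈ acc ∨ ∃ m ∈ L, x ∈ pvLsucc sd vd m := by
    intro L
    induction L with
    | nil => simp
    | cons m t ih =>
      intro acc
      simp only [List.foldl_cons, ih, pv_mem_foldl_add, List.mem_cons]
      constructor
      · rintro ((h | h) | ⟨m', hm', hx⟩)
        · exact Or.inl h
        · exact Or.inr ⟨m, Or.inl rfl, h⟩
        · exact Or.inr ⟨m', Or.inr hm', hx⟩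
      · rintro (h | ⟨m', (rfl | hm'), hx⟩)
        · exact Or.inl (Or.inl h)
        · exact Or.inl (Or.inr hx)
        · exact Or.inr ⟨m', hm', hx⟩
  exact key T T


theorem pv_subset_step (sd : PySem.Dict Int (List Int)) (vd : PySem.Dict Int Int)
    (T : List Int) : T ⊆ pvStep sd vd T := by
  intro x hx
  rw [pv_mem_step]
  exact Or.inl hx


theorem pv_nodup_step (sd : PySem.Dict Int (List Int)) (vd : PySem.Dict Int Int)
    (T : List Int) (h : T.Nodup) : (pvStep sd vd T).Nodup := by
  unfold pvStep
  have key : ∀ (L acc : List Int), acc.Nodup →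
      (L.foldl (fun acc m => (pvLsucc sd vd m).foldl (fun a s => PySem.Set.add a s) acc) acc).Nodup := by
    intro L
    induction L with
    | nil => intro acc h; exact h
    | cons m t ih => intro acc h; exact ih _ (pv_nodup_foldl_add _ _ h)
  exact key T T h


theorem pv_step_congr (sd : PySem.Dict Int (List Int)) (vd : PySem.Dict Int Int)
    (T T' : List Int) (h : ∀ x, x ∈ T ↔ x ∈ T') (x : Int) :
    x ∈ pvStep sd vd T ↔ x ∈ pvStep sd vd T' := by
  simp only [pv_mem_step]
  constructor
  · rintro (hx | ⟨m, hm, hs⟩)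
    · exact Or.inl ((h x).1 hx)
    · exact Or.inr ⟨m, (h m).1 hm, hs⟩
  · rintro (hx | ⟨m, hm, hs⟩)
    · exact Or.inl ((h x).2 hx)
    · exact Or.inr ⟨m, (h m).2 hm, hs⟩


theorem pv_iter_subset (sd : PySem.Dict Int (List Int)) (vd : PySem.Dict Int Int)
    (k : Nat) (T : List Int) : T ⊆ pvIter sd vd k T := by
  induction k with
  | zero => exact fun x hx => hx
  | succ k ih =>
    intro x hx
    exact pv_subset_step sd vd _ (ih hx)


theorem pv_nodup_iter (sd : PySem.Dict Int (List Int)) (vd : PySem.Dict Int Int)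
    (k : Nat) (T : List Int) (h : T.Nodup) : (pvIter sd vd k T).Nodup := by
  induction k with
  | zero => exact h
  | succ k ih => exact pv_nodup_step sd vd _ ih


theorem pv_iter_cand (sd : PySem.Dict Int (List Int)) (vd : PySem.Dict Int Int)
    (cand : List Int) (hl : ∀ m s, s ∈ pvLsucc sd vd m → s ∈ cand)
    (k : Nat) (T : List Int) (hT : ∀ x ∈ T, x ∈ cand) :
    ∀ x ∈ pvIter sd vd k T, x ∈ cand := by
  induction k with
  | zero => exact hT
  | succ k ih =>
    intro x hx
    rcases (pv_mem_step sd vd _ x).1 hx with h | ⟨m, _, hs⟩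
    · exact ih x h
    · exact hl m x hs


theorem pv_iter_into (sd : PySem.Dict Int (List Int)) (vd : PySem.Dict Int Int)
    (U : List Int) (hU : ∀ m ∈ U, ∀ s ∈ pvLsucc sd vd m, s ∈ U)
    (k : Nat) (T : List Int) (hT : ∀ x ∈ T, x ∈ U) :
    ∀ x ∈ pvIter sd vd k T, x ∈ U := by
  induction k with
  | zero => exact hT
  | succ k ih =>
    intro x hx
    rcases (pv_mem_step sd vd _ x).1 hx with h | ⟨m, hm, hs⟩
    · exact ih x h
    · exact hU m (ih m hm) x hs


theorem pv_iter_fix (sd : PySem.Dict Int (List Int)) (vd : PySem.Dict Int Int)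
    (T cand : List Int) (hnd : T.Nodup) (hT : ∀ x ∈ T, x ∈ cand)
    (hl : ∀ m s, s ∈ pvLsucc sd vd m → s ∈ cand)
    (N : Nat) (hN : cand.length + 1 ≤ N) (x : Int) :
    x ∈ pvStep sd vd (pvIter sd vd N T) ↔ x ∈ pvIter sd vd N T := by
  -- length of every iterate is bounded by cand.length
  have hb : ∀ k : Nat, (pvIter sd vd k T).length ≤ cand.length := by
    intro k
    have hnd' := pv_nodup_iter sd vd k T hnd
    have hsub := pv_iter_cand sd vd cand hl k T hT
    calc (pvIter sd vd k T).length
        = (pvIter sd vd k T).toFinset.card := (List.toFinset_card_of_nodup hnd').symm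
      _ ≤ cand.toFinset.card := by
          apply Finset.card_le_card
          intro y hy
          rw [List.mem_toFinset] at hy ⊢
          exact hsub y hy
      _ ≤ cand.length := List.toFinset_card_le cand
  -- if an iterate is not yet a (membership) fixpoint, its length grows
  have grow : ∀ k : Nat, ¬ (∀ y, y ∈ pvIter sd vd (k+1) T ↔ y ∈ pvIter sd vd k T) →
      (pvIter sd vd k T).length < (pvIter sd vd (k+1) T).length := by
    intro k hne
    have hsub : pvIter sd vd k T ⊆ pvIter sd vd (k+1) T := pv_subset_step sd vd _
    have hex : ∃ y, y ∈ pvIter sd vd (k+1) T ∧ y ∉ pvIter sd vd k T := by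
      by_contra hno
      exact hne (fun y => ⟨fun hy => by_contra fun hn => hno ⟨y, hy, hn⟩, fun hy => hsub hy⟩)
    obtain ⟨y, hy1, hy2⟩ := hex
    have hnd1 := pv_nodup_iter sd vd k T hnd
    have hnd2 := pv_nodup_iter sd vd (k+1) T hnd
    rw [← List.toFinset_card_of_nodup hnd1, ← List.toFinset_card_of_nodup hnd2]
    apply Finset.card_lt_card
    constructor
    · intro z hz; rw [List.mem_toFinset] at hz ⊢; exact hsub hz
    · intro hcon
      have := hcon (List.mem_toFinset.2 hy1)
      exact hy2 (List.mem_toFinset.1 this)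
  -- there is a fixpoint index k ≤ cand.length
  have ex : ∃ k : Nat, k ≤ cand.length ∧ (∀ y, y ∈ pvIter sd vd (k+1) T ↔ y ∈ pvIter sd vd k T) := by
    by_contra hno
    have hno' : ∀ k : Nat, k ≤ cand.length → ¬ (∀ y, y ∈ pvIter sd vd (k+1) T ↔ y ∈ pvIter sd vd k T) :=
      fun k hk hP => hno ⟨k, hk, hP⟩
    have mono : ∀ k : Nat, k ≤ cand.length + 1 → k ≤ (pvIter sd vd k T).length := by
      intro k
      induction k with
      | zero => intro _; omega
      | succ k ih =>
        intro hk
        have h1 := ih (by omega)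
        have h2 := grow k (hno' k (by omega))
        omega
    have := mono (cand.length + 1) (le_refl _)
    have := hb (cand.length + 1)
    omega
  obtain ⟨k, hk, hfixk⟩ := ex
  -- stability: beyond k the membership never changes again
  have stab : ∀ i : Nat, ∀ y, y ∈ pvIter sd vd (k + i) T ↔ y ∈ pvIter sd vd k T := by
    intro i
    induction i with
    | zero => intro y; rfl
    | succ i ih =>
      intro y
      have : pvIter sd vd (k + i + 1) T = pvStep sd vd (pvIter sd vd (k + i) T) := rfl
      rw [show k + (i+1) = (k + i) + 1 by omega, this]
      calc y ∈ pvStep sd vd (pvIter sd vd (k + i) T)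
          ↔ y ∈ pvStep sd vd (pvIter sd vd k T) := pv_step_congr sd vd _ _ ih y
        _ ↔ y ∈ pvIter sd vd (k+1) T := Iff.rfl
        _ ↔ y ∈ pvIter sd vd k T := hfixk y
  have hNk : k ≤ N := by omega
  have h1 : ∀ y, y ∈ pvIter sd vd N T ↔ y ∈ pvIter sd vd k T := by
    intro y
    have := stab (N - k) y
    rwa [show k + (N - k) = N by omega] at this
  calc x ∈ pvStep sd vd (pvIter sd vd N T)
      ↔ x ∈ pvStep sd vd (pvIter sd vd k T) := pv_step_congr sd vd _ _ h1 x
    _ ↔ x ∈ pvIter sd vd (k+1) T := Iff.rfl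
    _ ↔ x ∈ pvIter sd vd k T := hfixk x
    _ ↔ x ∈ pvIter sd vd N T := (h1 x).symm



-- ---- instantiation at (node, S, V) ----
theorem pv_lsucc_cand (S : List (Int × List Int)) (V : List (Int × Int)) (m s : Int)
    (h : s ∈ pvLsucc (PySem.Dict.ofList S) (PySem.Dict.ofList V) m) :
    s ∈ S.flatMap Prod.snd := by
  unfold pvLsucc at h
  split at h
  · simp at h
  · cases hg : (PySem.Dict.ofList S).get? m with
    | none =>
      rw [PySem.Dict.getD_of_get?_eq_none _ _ hg] at h
      simp at h
    | some l =>
      rw [PySem.Dict.getD_of_get?_eq_some _ _ hg] at h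
      have hmem := PySem.Dict.mem_items_of_get?_eq_some _ hg
      have hS := pv_items_ofList_subset S _ hmem
      exact List.mem_flatMap.2 ⟨(m, l), hS, h⟩

theorem pv_closure_fix (node : Int) (S : List (Int × List Int)) (V : List (Int × Int)) (x : Int) :
    x ∈ pvStep (PySem.Dict.ofList S) (PySem.Dict.ofList V) (pvClosure node S V) ↔
      x ∈ pvClosure node S V := by
  unfold pvClosure
  apply pv_iter_fix (cand := node :: S.flatMap Prod.snd)
  · exact List.nodup_singleton node
  · intro x hx
    rw [List.mem_singleton] at hx
    rw [hx]; exact List.mem_cons_self ..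
  · intro m s hs
    exact List.mem_cons_of_mem _ (pv_lsucc_cand S V m s hs)
  · simp [pvN]

theorem pv_reach_fix (n : Int) (S : List (Int × List Int)) (V : List (Int × Int)) (x : Int) :
    x ∈ pvStep (PySem.Dict.ofList S) (PySem.Dict.ofList V) (pvReach n S V) ↔
      x ∈ pvReach n S V := by
  unfold pvReach
  apply pv_iter_fix (cand := S.flatMap Prod.snd)
  · exact PySem.Set.nodup_ofList _
  · intro x hx
    rw [PySem.Set.mem_ofList] at hx
    exact pv_lsucc_cand S V n x hx
  · intro m s hs
    exact pv_lsucc_cand S V m s hs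
  · simp [pvN]

theorem pv_closure_self (node : Int) (S : List (Int × List Int)) (V : List (Int × Int)) :
    node ∈ pvClosure node S V :=
  pv_iter_subset _ _ _ _ (List.mem_singleton.2 rfl)

theorem pv_closure_closed (node : Int) (S : List (Int × List Int)) (V : List (Int × Int))
    {m s : Int} (hm : m ∈ pvClosure node S V)
    (hs : s ∈ pvLsucc (PySem.Dict.ofList S) (PySem.Dict.ofList V) m) :
    s ∈ pvClosure node S V :=
  (pv_closure_fix node S V s).1 ((pv_mem_step _ _ _ s).2 (Or.inr ⟨m, hm, hs⟩))

theorem pv_reach_closed (n : Int) (S : List (Int × List Int)) (V : List (Int × Int))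
    {m s : Int} (hm : m ∈ pvReach n S V)
    (hs : s ∈ pvLsucc (PySem.Dict.ofList S) (PySem.Dict.ofList V) m) :
    s ∈ pvReach n S V :=
  (pv_reach_fix n S V s).1 ((pv_mem_step _ _ _ s).2 (Or.inr ⟨m, hm, hs⟩))

theorem pv_lsucc_subset_reach (n : Int) (S : List (Int × List Int)) (V : List (Int × Int))
    {s : Int} (hs : s ∈ pvLsucc (PySem.Dict.ofList S) (PySem.Dict.ofList V) n) :
    s ∈ pvReach n S V :=
  pv_iter_subset _ _ _ _ ((PySem.Set.mem_ofList _ _).2 hs)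

theorem pv_reach_subset_closure (node : Int) (S : List (Int × List Int)) (V : List (Int × Int))
    {n : Int} (hn : n ∈ pvClosure node S V) :
    ∀ x ∈ pvReach n S V, x ∈ pvClosure node S V := by
  unfold pvReach
  apply pv_iter_into
  · intro m hm s hs
    exact pv_closure_closed node S V hm hs
  · intro x hx
    rw [PySem.Set.mem_ofList] at hx
    exact pv_closure_closed node S V hn hx

theorem pv_reach_trans (n : Int) (S : List (Int × List Int)) (V : List (Int × Int))
    {s : Int} (hs : s ∈ pvLsucc (PySem.Dict.ofList S) (PySem.Dict.ofList V) n) :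
    ∀ x ∈ pvReach s S V, x ∈ pvReach n S V := by
  unfold pvReach
  apply pv_iter_into
  · intro m hm x hx
    exact pv_reach_closed n S V hm hx
  · intro x hx
    rw [PySem.Set.mem_ofList] at hx
    exact pv_reach_closed n S V (pv_lsucc_subset_reach n S V hs) hx

theorem pv_nodup_reach (n : Int) (S : List (Int × List Int)) (V : List (Int × Int)) :
    (pvReach n S V).Nodup :=
  pv_nodup_iter _ _ _ _ (PySem.Set.nodup_ofList _)

-- ---- the live-depth measure ----
def pvLm (n : Int) (S : List (Int × List Int)) (V : List (Int × Int)) : Nat :=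
  ((pvReach n S V).filter (fun m => !(PySem.Dict.ofList V).contains m)).length

theorem pv_lm_lt (node : Int) (S : List (Int × List Int)) (V : List (Int × Int))
    (hPre : Pre_dfs_mem node S V) {n s : Int}
    (hn : n ∈ pvClosure node S V)
    (hs : s ∈ pvLsucc (PySem.Dict.ofList S) (PySem.Dict.ofList V) n)
    (hslive : (PySem.Dict.ofList V).contains s = false) :
    pvLm s S V < pvLm n S V := by
  have hsC : s ∈ pvClosure node S V := pv_closure_closed node S V hn hs
  have hnoloop : s ∉ pvReach s S V := (hPre s hsC hslive).2
  have hsub : ∀ x ∈ (pvReach s S V).filter (fun m => !(PySem.Dict.ofList V).contains m),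
      x ∈ (pvReach n S V).filter (fun m => !(PySem.Dict.ofList V).contains m) := by
    intro x hx
    rw [List.mem_filter] at hx ⊢
    exact ⟨pv_reach_trans n S V hs x hx.1, hx.2⟩
  have hnd1 : ((pvReach s S V).filter (fun m => !(PySem.Dict.ofList V).contains m)).Nodup :=
    (pv_nodup_reach s S V).filter _
  have hnd2 : ((pvReach n S V).filter (fun m => !(PySem.Dict.ofList V).contains m)).Nodup :=
    (pv_nodup_reach n S V).filter _
  unfold pvLm
  rw [← List.toFinset_card_of_nodup hnd1, ← List.toFinset_card_of_nodup hnd2]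
  apply Finset.card_lt_card
  constructor
  · intro x hx
    rw [List.mem_toFinset] at hx ⊢
    exact hsub x hx
  · intro hcon
    have hsin : s ∈ (pvReach n S V).filter (fun m => !(PySem.Dict.ofList V).contains m) := by
      rw [List.mem_filter]
      exact ⟨pv_lsucc_subset_reach n S V hs, by rw [hslive]; rfl⟩
    have := hcon (List.mem_toFinset.2 hsin)
    rw [List.mem_toFinset, List.mem_filter] at this
    exact hnoloop this.1

theorem pv_lm_le (node : Int) (S : List (Int × List Int)) (V : List (Int × Int))
    (hPre : Pre_dfs_mem node S V) {n : Int} (hn : n ∈ pvClosure node S V) :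
    pvLm n S V ≤ S.length := by
  have hsub : ∀ x ∈ (pvReach n S V).filter (fun m => !(PySem.Dict.ofList V).contains m),
      x ∈ (PySem.Dict.ofList S).keys := by
    intro x hx
    rw [List.mem_filter] at hx
    have hxC : x ∈ pvClosure node S V := pv_reach_subset_closure node S V hn x hx.1
    have hxl : (PySem.Dict.ofList V).contains x = false := by
      have := hx.2; cases hcv : (PySem.Dict.ofList V).contains x
      · rfl
      · rw [hcv] at this; simp at this
    exact (PySem.Dict.contains_iff_mem_keys _ _).1 (hPre x hxC hxl).1
  have hnd : ((pvReach n S V).filter (fun m => !(PySem.Dict.ofList V).contains m)).Nodup :=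
    (pv_nodup_reach n S V).filter _
  unfold pvLm
  calc ((pvReach n S V).filter (fun m => !(PySem.Dict.ofList V).contains m)).length
      = ((pvReach n S V).filter (fun m => !(PySem.Dict.ofList V).contains m)).toFinset.card :=
        (List.toFinset_card_of_nodup hnd).symm
    _ ≤ (PySem.Dict.ofList S).keys.toFinset.card := by
        apply Finset.card_le_card
        intro y hy
        rw [List.mem_toFinset] at hy ⊢
        exact hsub y hy
    _ ≤ (PySem.Dict.ofList S).keys.length := List.toFinset_card_le _
    _ = (PySem.Dict.ofList S).items.length := by simp [PySem.Dict.keys]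
    _ ≤ S.length := pv_items_ofList_length_le S


-- ---- the canonical value of a node (what A's recursion computes) ----
def pvVal (sd : PySem.Dict Int (List Int)) (vd : PySem.Dict Int Int) : Nat → Int → Int
  | 0, _ => 0
  | f + 1, n =>
    if vd.contains n then vd.getD n 0
    else (sd.getD n []).foldl (fun a s => a + pvVal sd vd f s) 0

def pvB (n : Int) (S : List (Int × List Int)) (V : List (Int × Int)) : Nat :=
  if (PySem.Dict.ofList V).contains n then 1 else pvLm n S V + 2

def pvTrue (n : Int) (S : List (Int × List Int)) (V : List (Int × Int)) : Int :=
  pvVal (PySem.Dict.ofList S) (PySem.Dict.ofList V) (pvB n S V) n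

theorem pv_B_pos (n : Int) (S : List (Int × List Int)) (V : List (Int × Int)) :
    1 ≤ pvB n S V := by
  unfold pvB; split <;> omega

theorem pv_val_dead (sd : PySem.Dict Int (List Int)) (vd : PySem.Dict Int Int)
    {n : Int} (h : vd.contains n = true) {f : Nat} (hf : 1 ≤ f) :
    pvVal sd vd f n = vd.getD n 0 := by
  obtain ⟨f', rfl⟩ : ∃ f', f = f' + 1 := ⟨f - 1, by omega⟩
  simp [pvVal, h]

theorem pv_true_dead (S : List (Int × List Int)) (V : List (Int × Int))
    {n : Int} (h : (PySem.Dict.ofList V).contains n = true) :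
    pvTrue n S V = (PySem.Dict.ofList V).getD n 0 := by
  unfold pvTrue pvB
  rw [if_pos h]
  exact pv_val_dead _ _ h (le_refl 1)

theorem pv_val_succ (sd : PySem.Dict Int (List Int)) (vd : PySem.Dict Int Int) (f : Nat) (n : Int) :
    pvVal sd vd (f + 1) n =
      if vd.contains n then vd.getD n 0
      else (sd.getD n []).foldl (fun a s => a + pvVal sd vd f s) 0 := rfl

theorem pv_val_stab (node : Int) (S : List (Int × List Int)) (V : List (Int × Int))
    (hPre : Pre_dfs_mem node S V) :
    ∀ L n, n ∈ pvClosure node S V → pvLm n S V ≤ L →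
      ∀ f, pvB n S V ≤ f →
        pvVal (PySem.Dict.ofList S) (PySem.Dict.ofList V) f n = pvTrue n S V := by
  intro L
  induction L with
  | zero =>
    intro n hn hlm f hf
    by_cases hdead : (PySem.Dict.ofList V).contains n = true
    · rw [pv_val_dead _ _ hdead (le_trans (pv_B_pos n S V) hf), pv_true_dead S V hdead]
    · rw [pvB, if_neg hdead] at hf
      obtain ⟨f', rfl⟩ : ∃ f', f = f' + 1 := ⟨f - 1, by omega⟩
      rw [pv_val_succ, if_neg hdead, pvTrue, pvB, if_neg hdead,
        show pvLm n S V + 2 = (pvLm n S V + 1) + 1 from rfl, pv_val_succ, if_neg hdead]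
      apply PySem.List.foldl_congr_mem
      intro acc s hsmem
      have hs : s ∈ pvLsucc (PySem.Dict.ofList S) (PySem.Dict.ofList V) n := by
        rw [pvLsucc, if_neg hdead]; exact hsmem
      congr 1
      by_cases hsd : (PySem.Dict.ofList V).contains s = true
      · rw [pv_val_dead _ _ hsd (by omega), pv_val_dead _ _ hsd (by omega)]
      · have hsl : (PySem.Dict.ofList V).contains s = false := by
          cases h : (PySem.Dict.ofList V).contains s
          · rfl
          · exact absurd h hsd
        have hlive : (PySem.Dict.ofList V).contains n = false := by
          cases h : (PySem.Dict.ofList V).contains n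
          · rfl
          · exact absurd h hdead
        have := pv_lm_lt node S V hPre hn hs hsl
        omega
  | succ L ihL =>
    intro n hn hlm f hf
    by_cases hdead : (PySem.Dict.ofList V).contains n = true
    · rw [pv_val_dead _ _ hdead (le_trans (pv_B_pos n S V) hf), pv_true_dead S V hdead]
    · rw [pvB, if_neg hdead] at hf
      obtain ⟨f', rfl⟩ : ∃ f', f = f' + 1 := ⟨f - 1, by omega⟩
      rw [pv_val_succ, if_neg hdead, pvTrue, pvB, if_neg hdead,
        show pvLm n S V + 2 = (pvLm n S V + 1) + 1 from rfl, pv_val_succ, if_neg hdead]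
      apply PySem.List.foldl_congr_mem
      intro acc s hsmem
      have hs : s ∈ pvLsucc (PySem.Dict.ofList S) (PySem.Dict.ofList V) n := by
        rw [pvLsucc, if_neg hdead]; exact hsmem
      congr 1
      have hsC : s ∈ pvClosure node S V := pv_closure_closed node S V hn hs
      by_cases hsd : (PySem.Dict.ofList V).contains s = true
      · rw [pv_val_dead _ _ hsd (by omega), pv_val_dead _ _ hsd (by omega)]
      · have hsl : (PySem.Dict.ofList V).contains s = false := by
          cases h : (PySem.Dict.ofList V).contains s
          · rfl
          · exact absurd h hsd
        have hlt := pv_lm_lt node S V hPre hn hs hsl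
        have hBs : pvB s S V = pvLm s S V + 2 := by rw [pvB, if_neg hsd]
        rw [ihL s hsC (by omega) f' (by omega),
            ihL s hsC (by omega) (pvLm n S V + 1) (by omega)]

theorem pv_true_live (node : Int) (S : List (Int × List Int)) (V : List (Int × Int))
    (hPre : Pre_dfs_mem node S V) {n : Int}
    (hn : n ∈ pvClosure node S V) (hlive : (PySem.Dict.ofList V).contains n = false) :
    pvTrue n S V =
      ((PySem.Dict.ofList S).getD n []).foldl (fun a s => a + pvTrue s S V) 0 := by
  have hdead : ¬ (PySem.Dict.ofList V).contains n = true := by rw [hlive]; simp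
  rw [pvTrue, pvB, if_neg hdead,
    show pvLm n S V + 2 = (pvLm n S V + 1) + 1 from rfl, pv_val_succ, if_neg hdead]
  apply PySem.List.foldl_congr_mem
  intro acc s hsmem
  have hs : s ∈ pvLsucc (PySem.Dict.ofList S) (PySem.Dict.ofList V) n := by
    rw [pvLsucc, if_neg hdead]; exact hsmem
  congr 1
  have hsC : s ∈ pvClosure node S V := pv_closure_closed node S V hn hs
  by_cases hsd : (PySem.Dict.ofList V).contains s = true
  · rw [pv_val_dead _ _ hsd (by omega), pv_true_dead S V hsd]
  · have hsl : (PySem.Dict.ofList V).contains s = false := by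
      cases h : (PySem.Dict.ofList V).contains s
      · rfl
      · exact absurd h hsd
    have hlt := pv_lm_lt node S V hPre hn hs hsl
    apply pv_val_stab node S V hPre (pvLm s S V) s hsC (le_refl _)
    rw [pvB, if_neg hsd]
    omega


-- ---- the cache invariant shared by both ports ----
def pvInv (node : Int) (S : List (Int × List Int)) (V : List (Int × Int))
    (d : PySem.Dict Int Int) : Prop :=
  (∀ k, (PySem.Dict.ofList V).contains k = true → d.get? k = (PySem.Dict.ofList V).get? k) ∧
  (∀ k v, d.get? k = some v → (PySem.Dict.ofList V).contains k = false →
    k ∈ pvClosure node S V → v = pvTrue k S V)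

theorem pv_inv_init (node : Int) (S : List (Int × List Int)) (V : List (Int × Int)) :
    pvInv node S V (PySem.Dict.ofList V) := by
  constructor
  · intro k _; rfl
  · intro k v hk hlive _
    have : (PySem.Dict.ofList V).contains k = true :=
      (pv_contains_iff_some _ _).2 ⟨v, hk⟩
    rw [this] at hlive; cases hlive

theorem pv_contains_live (node : Int) (S : List (Int × List Int)) (V : List (Int × Int))
    {d : PySem.Dict Int Int} (hInv : pvInv node S V d) {n : Int}
    (hc : d.contains n = false) : (PySem.Dict.ofList V).contains n = false := by
  cases hv : (PySem.Dict.ofList V).contains n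
  · rfl
  · exfalso
    obtain ⟨v, hg⟩ := (pv_contains_iff_some _ _).1 hv
    have : d.get? n = some v := by rw [hInv.1 n hv]; exact hg
    have := (pv_contains_iff_some d n).2 ⟨v, this⟩
    rw [hc] at this; cases this

theorem pv_getD_inv (node : Int) (S : List (Int × List Int)) (V : List (Int × Int))
    {d : PySem.Dict Int Int} (hInv : pvInv node S V d) {k : Int}
    (hc : d.contains k = true)
    (hk : (PySem.Dict.ofList V).contains k = true ∨ k ∈ pvClosure node S V) :
    d.getD k 0 = pvTrue k S V := by
  obtain ⟨v, hg⟩ := (pv_contains_iff_some _ _).1 hc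
  rw [PySem.Dict.getD_of_get?_eq_some _ _ hg]
  by_cases hdead : (PySem.Dict.ofList V).contains k = true
  · have := hInv.1 k hdead
    rw [this] at hg
    rw [pv_true_dead S V hdead, PySem.Dict.getD_of_get?_eq_some _ _ hg]
  · have hlive : (PySem.Dict.ofList V).contains k = false := by
      cases h : (PySem.Dict.ofList V).contains k
      · rfl
      · exact absurd h hdead
    rcases hk with hk | hk
    · exact absurd hk hdead
    · exact hInv.2 k v hg hlive hk

-- A's recursion returns pvTrue and preserves the invariant (growing the cache)
theorem pv_dfsA_correct (node : Int) (S : List (Int × List Int)) (V : List (Int × Int))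
    (hPre : Pre_dfs_mem node S V) :
    ∀ fuel n d, n ∈ pvClosure node S V → pvInv node S V d → pvB n S V ≤ fuel →
      (dfsA (PySem.Dict.ofList S) fuel n d).1 = pvTrue n S V ∧
      pvInv node S V (dfsA (PySem.Dict.ofList S) fuel n d).2 ∧
      (∀ k v, d.get? k = some v → ((dfsA (PySem.Dict.ofList S) fuel n d).2).get? k = some v) := by
  intro fuel
  induction fuel with
  | zero =>
    intro n d _ _ hB
    have := pv_B_pos n S V
    omega
  | succ fuel ih =>
    intro n d hn hInv hB
    by_cases hc : d.contains n = true
    · have hstep : dfsA (PySem.Dict.ofList S) (fuel + 1) n d = (d.getD n 0, d) := by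
        simp [dfsA, hc]
      rw [hstep]
      exact ⟨pv_getD_inv node S V hInv hc (Or.inr hn), hInv, fun k v h => h⟩
    · have hcf : d.contains n = false := by
        cases h : d.contains n
        · rfl
        · exact absurd h hc
      have hlive : (PySem.Dict.ofList V).contains n = false :=
        pv_contains_live node S V hInv hcf
      have hBn : pvB n S V = pvLm n S V + 2 := by
        rw [pvB, if_neg (by rw [hlive]; simp)]
      -- the for-loop over the successors
      have foldOK : ∀ (ss : List Int), (∀ s ∈ ss, s ∈ pvClosure node S V ∧ pvB s S V ≤ fuel) →
          ∀ (r : Int) (d' : PySem.Dict Int Int), pvInv node S V d' →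
            (ss.foldl (fun (acc : Int × PySem.Dict Int Int) s =>
                let q := dfsA (PySem.Dict.ofList S) fuel s acc.2
                (acc.1 + q.1, q.2)) (r, d')).1 = ss.foldl (fun a s => a + pvTrue s S V) r ∧
            pvInv node S V (ss.foldl (fun (acc : Int × PySem.Dict Int Int) s =>
                let q := dfsA (PySem.Dict.ofList S) fuel s acc.2
                (acc.1 + q.1, q.2)) (r, d')).2 ∧
            (∀ k v, d'.get? k = some v →
              ((ss.foldl (fun (acc : Int × PySem.Dict Int Int) s =>
                let q := dfsA (PySem.Dict.ofList S) fuel s acc.2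
                (acc.1 + q.1, q.2)) (r, d')).2).get? k = some v) := by
        intro ss
        induction ss with
        | nil => exact fun _ r d' h => ⟨rfl, h, fun k v h => h⟩
        | cons s t iht =>
          intro hss r d' hInv'
          have hsprop := hss s (List.mem_cons_self ..)
          obtain ⟨h1, h2, h3⟩ := ih s d' hsprop.1 hInv' hsprop.2
          simp only [List.foldl_cons]
          have ht := iht (fun x hx => hss x (List.mem_cons_of_mem _ hx))
            (r + (dfsA (PySem.Dict.ofList S) fuel s d').1)
            (dfsA (PySem.Dict.ofList S) fuel s d').2 h2
          refine ⟨by rw [ht.1, h1], ht.2.1, fun k v hkv => ht.2.2 k v (h3 k v hkv)⟩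
      have hsucc : ∀ s ∈ (PySem.Dict.ofList S).getD n [],
          s ∈ pvClosure node S V ∧ pvB s S V ≤ fuel := by
        intro s hsmem
        have hs : s ∈ pvLsucc (PySem.Dict.ofList S) (PySem.Dict.ofList V) n := by
          rw [pvLsucc, if_neg (by rw [hlive]; simp)]; exact hsmem
        have hsC : s ∈ pvClosure node S V := pv_closure_closed node S V hn hs
        refine ⟨hsC, ?_⟩
        by_cases hsd : (PySem.Dict.ofList V).contains s = true
        · rw [pvB, if_pos hsd]; omega
        · have hsl : (PySem.Dict.ofList V).contains s = false := by
            cases h : (PySem.Dict.ofList V).contains s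
            · rfl
            · exact absurd h hsd
          rw [pvB, if_neg hsd]
          have := pv_lm_lt node S V hPre hn hs hsl
          omega
      obtain ⟨hv, hI, hM⟩ := foldOK _ hsucc 0 d hInv
      have hstep : dfsA (PySem.Dict.ofList S) (fuel + 1) n d =
          ((((PySem.Dict.ofList S).getD n []).foldl (fun (acc : Int × PySem.Dict Int Int) s =>
              let q := dfsA (PySem.Dict.ofList S) fuel s acc.2
              (acc.1 + q.1, q.2)) (0, d)).1,
           (((PySem.Dict.ofList S).getD n []).foldl (fun (acc : Int × PySem.Dict Int Int) s =>
              let q := dfsA (PySem.Dict.ofList S) fuel s acc.2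
              (acc.1 + q.1, q.2)) (0, d)).2.insert n
            ((((PySem.Dict.ofList S).getD n []).foldl (fun (acc : Int × PySem.Dict Int Int) s =>
              let q := dfsA (PySem.Dict.ofList S) fuel s acc.2
              (acc.1 + q.1, q.2)) (0, d)).1)) := by
        simp [dfsA, hc]
      rw [hstep]
      have hval : (((PySem.Dict.ofList S).getD n []).foldl (fun (acc : Int × PySem.Dict Int Int) s =>
          let q := dfsA (PySem.Dict.ofList S) fuel s acc.2
          (acc.1 + q.1, q.2)) (0, d)).1 = pvTrue n S V := by
        rw [hv, ← pv_true_live node S V hPre hn hlive]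
      refine ⟨hval, ⟨?_, ?_⟩, ?_⟩
      · -- first invariant clause survives the insert
        intro k hk
        have hkn : k ≠ n := by
          intro h; rw [h, hlive] at hk; cases hk
        rw [PySem.Dict.get?_insert_of_ne _ _ hkn]
        exact hI.1 k hk
      · -- second invariant clause
        intro k v hkv hklive hkC
        by_cases hkn : k = n
        · subst hkn
          rw [PySem.Dict.get?_insert_self] at hkv
          cases hkv
          exact hval
        · rw [PySem.Dict.get?_insert_of_ne _ _ hkn] at hkv
          exact hI.2 k v hkv hklive hkC
      · -- the cache only grows
        intro k v hkv
        have hkn : k ≠ n := by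
          intro h
          rw [h] at hkv
          have := (pv_contains_iff_some d n).2 ⟨v, hkv⟩
          rw [hcf] at this; cases this
        rw [PySem.Dict.get?_insert_of_ne _ _ hkn]
        exact hM k v hkv


-- ---- B's rounds preserve the same invariant and make progress ----
theorem pv_roundB_cons (kv : Int × List Int) (items : List (Int × List Int))
    (st : PySem.Dict Int Int × Bool) :
    roundB (kv :: items) st =
      roundB items
        (if ¬ st.1.contains kv.1 ∧ kv.2.all st.1.contains then
          (st.1.insert kv.1 (sumCached st.1 kv.2), true)
        else st) := rfl

theorem pv_round_mono (items : List (Int × List Int)) :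
    ∀ st : PySem.Dict Int Int × Bool,
      (∀ k v, st.1.get? k = some v → (roundB items st).1.get? k = some v) ∧
      (st.2 = true → (roundB items st).2 = true) := by
  induction items with
  | nil => exact fun st => ⟨fun k v h => h, fun h => h⟩
  | cons kv t ih =>
    intro st
    rw [pv_roundB_cons]
    by_cases hcond : ¬ st.1.contains kv.1 ∧ kv.2.all st.1.contains
    · rw [if_pos hcond]
      have hrec := ih (st.1.insert kv.1 (sumCached st.1 kv.2), true)
      constructor
      · intro k v hk
        apply hrec.1
        show (st.1.insert kv.1 (sumCached st.1 kv.2)).get? k = some v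
        have hkn : k ≠ kv.1 := by
          intro h
          rw [h] at hk
          exact hcond.1 ((pv_contains_iff_some _ _).2 ⟨v, hk⟩)
        rw [PySem.Dict.get?_insert_of_ne _ _ hkn]
        exact hk
      · intro _; exact hrec.2 rfl
    · rw [if_neg hcond]; exact ih st

theorem pv_round_contains_mono (items : List (Int × List Int))
    (st : PySem.Dict Int Int × Bool) {k : Int} (h : st.1.contains k = true) :
    (roundB items st).1.contains k = true := by
  obtain ⟨v, hv⟩ := (pv_contains_iff_some _ _).1 h
  exact (pv_contains_iff_some _ _).2 ⟨v, (pv_round_mono items st).1 k v hv⟩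

theorem pv_round_resolves (items : List (Int × List Int)) :
    ∀ (st : PySem.Dict Int Int × Bool) (k : Int) (ss : List Int),
      (k, ss) ∈ items → ss.all st.1.contains = true →
      (roundB items st).1.contains k = true := by
  induction items with
  | nil => intro st k ss h; cases h
  | cons kv t ih =>
    intro st k ss hmem hall
    rw [pv_roundB_cons]
    rcases List.mem_cons.1 hmem with heq | hmem'
    · by_cases hcond : ¬ st.1.contains kv.1 ∧ kv.2.all st.1.contains
      · rw [if_pos hcond]
        apply pv_round_contains_mono
        have hk1 : kv.1 = k := by rw [← heq]
        show (st.1.insert kv.1 (sumCached st.1 kv.2)).contains k = true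
        rw [← hk1]
        exact PySem.Dict.contains_insert_self _ _ _
      · rw [if_neg hcond]
        apply pv_round_contains_mono
        have hk : k = kv.1 := by rw [← heq]
        rw [hk]
        by_cases hc : st.1.contains kv.1 = true
        · exact hc
        · exfalso
          apply hcond
          refine ⟨fun h => hc h, ?_⟩
          have : kv.2 = ss := by rw [← heq]
          rw [this]
          exact hall
    · by_cases hcond : ¬ st.1.contains kv.1 ∧ kv.2.all st.1.contains
      · rw [if_pos hcond]
        apply ih _ k ss hmem'
        rw [List.all_eq_true] at hall ⊢
        intro s hs
        have := hall s hs
        show (st.1.insert kv.1 (sumCached st.1 kv.2)).contains s = true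
        obtain ⟨v, hv⟩ := (pv_contains_iff_some _ _).1 this
        apply (pv_contains_iff_some _ _).2
        by_cases hsn : s = kv.1
        · exact ⟨sumCached st.1 kv.2, by rw [hsn, PySem.Dict.get?_insert_self]⟩
        · exact ⟨v, by rw [PySem.Dict.get?_insert_of_ne _ _ hsn]; exact hv⟩
      · rw [if_neg hcond]
        exact ih st k ss hmem' hall

theorem pv_round_flag (items : List (Int × List Int)) :
    ∀ st : PySem.Dict Int Int × Bool, (roundB items st).2 = false → roundB items st = st := by
  induction items with
  | nil => intro st _; rfl
  | cons kv t ih =>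
    intro st hfl
    rw [pv_roundB_cons] at hfl ⊢
    by_cases hcond : ¬ st.1.contains kv.1 ∧ kv.2.all st.1.contains
    · exfalso
      rw [if_pos hcond] at hfl
      have := (pv_round_mono t (st.1.insert kv.1 (sumCached st.1 kv.2), true)).2 rfl
      rw [hfl] at this
      cases this
    · rw [if_neg hcond] at hfl ⊢
      exact ih st hfl

theorem pv_round_inv (node : Int) (S : List (Int × List Int)) (V : List (Int × Int))
    (hPre : Pre_dfs_mem node S V) :
    ∀ (items : List (Int × List Int)), (∀ p ∈ items, p ∈ (PySem.Dict.ofList S).items) →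
      ∀ st : PySem.Dict Int Int × Bool, pvInv node S V st.1 →
        pvInv node S V (roundB items st).1 := by
  intro items
  induction items with
  | nil => exact fun _ st h => h
  | cons kv t ih =>
    intro hsub st hInv
    rw [pv_roundB_cons]
    by_cases hcond : ¬ st.1.contains kv.1 ∧ kv.2.all st.1.contains
    · rw [if_pos hcond]
      apply ih (fun p hp => hsub p (List.mem_cons_of_mem _ hp))
      show pvInv node S V (st.1.insert kv.1 (sumCached st.1 kv.2))
      have hcnot : st.1.contains kv.1 = false := by
        cases h : st.1.contains kv.1
        · rfl
        · exact absurd h hcond.1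
      have hlivek : (PySem.Dict.ofList V).contains kv.1 = false :=
        pv_contains_live node S V hInv hcnot
      have hget : (PySem.Dict.ofList S).get? kv.1 = some kv.2 :=
        PySem.Dict.get?_of_mem_items _ (hsub kv (List.mem_cons_self ..))
          (PySem.Dict.nodup_keys_ofList S)
      constructor
      · intro k hk
        have hkn : k ≠ kv.1 := by
          intro h; rw [h, hlivek] at hk; cases hk
        rw [PySem.Dict.get?_insert_of_ne _ _ hkn]
        exact hInv.1 k hk
      · intro k v hkv hklive hkC
        by_cases hkn : k = kv.1
        · subst hkn
          rw [PySem.Dict.get?_insert_self] at hkv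
          cases hkv
          -- the freshly cached value is the true value
          rw [pv_true_live node S V hPre hkC hklive,
            PySem.Dict.getD_of_get?_eq_some _ _ hget]
          unfold sumCached
          apply PySem.List.foldl_congr_mem
          intro acc s hsmem
          have hs : s ∈ pvLsucc (PySem.Dict.ofList S) (PySem.Dict.ofList V) kv.1 := by
            rw [pvLsucc, if_neg (by rw [hklive]; simp),
              PySem.Dict.getD_of_get?_eq_some _ _ hget]
            exact hsmem
          have hsC : s ∈ pvClosure node S V := pv_closure_closed node S V hkC hs
          have hscont : st.1.contains s = true := by
            have := hcond.2
            rw [List.all_eq_true] at this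
            exact this s hsmem
          rw [pv_getD_inv node S V hInv hscont (Or.inr hsC)]
        · rw [PySem.Dict.get?_insert_of_ne _ _ hkn] at hkv
          exact hInv.2 k v hkv hklive hkC
    · rw [if_neg hcond]
      exact ih (fun p hp => hsub p (List.mem_cons_of_mem _ hp)) st hInv

def pvLevel (node : Int) (S : List (Int × List Int)) (V : List (Int × Int))
    (c : Nat) (d : PySem.Dict Int Int) : Prop :=
  ∀ k, k ∈ pvClosure node S V → (PySem.Dict.ofList V).contains k = false →
    pvLm k S V < c → d.contains k = true

theorem pv_round_level (node : Int) (S : List (Int × List Int)) (V : List (Int × Int))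
    (hPre : Pre_dfs_mem node S V) (st : PySem.Dict Int Int × Bool)
    (hInv : pvInv node S V st.1) (c : Nat) (hlev : pvLevel node S V c st.1) :
    pvLevel node S V (c + 1) (roundB (PySem.Dict.ofList S).items st).1 := by
  intro k hkC hklive hlm
  by_cases hlt : pvLm k S V < c
  · exact pv_round_contains_mono _ _ (hlev k hkC hklive hlt)
  · obtain ⟨ss, hget⟩ := (pv_contains_iff_some _ _).1 (hPre k hkC hklive).1
    apply pv_round_resolves _ st k ss (PySem.Dict.mem_items_of_get?_eq_some _ hget)
    rw [List.all_eq_true]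
    intro s hsmem
    have hs : s ∈ pvLsucc (PySem.Dict.ofList S) (PySem.Dict.ofList V) k := by
      rw [pvLsucc, if_neg (by rw [hklive]; simp),
        PySem.Dict.getD_of_get?_eq_some _ _ hget]
      exact hsmem
    have hsC : s ∈ pvClosure node S V := pv_closure_closed node S V hkC hs
    by_cases hsd : (PySem.Dict.ofList V).contains s = true
    · obtain ⟨v, hv⟩ := (pv_contains_iff_some _ _).1 hsd
      apply (pv_contains_iff_some _ _).2
      exact ⟨v, by rw [hInv.1 s hsd]; exact hv⟩
    · have hsl : (PySem.Dict.ofList V).contains s = false := by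
        cases h : (PySem.Dict.ofList V).contains s
        · rfl
        · exact absurd h hsd
      have := pv_lm_lt node S V hPre hkC hs hsl
      exact hlev s hsC hsl (by omega)

theorem pv_exists_ready (node : Int) (S : List (Int × List Int)) (V : List (Int × Int))
    (hPre : Pre_dfs_mem node S V) (d : PySem.Dict Int Int) (hInv : pvInv node S V d) :
    ∀ L k, k ∈ pvClosure node S V → (PySem.Dict.ofList V).contains k = false →
      pvLm k S V ≤ L → d.contains k = false →
      ∃ k' ss, (k', ss) ∈ (PySem.Dict.ofList S).items ∧ d.contains k' = false ∧
        ss.all d.contains = true := by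
  intro L
  induction L with
  | zero =>
    intro k hkC hklive _ hk
    obtain ⟨ss, hget⟩ := (pv_contains_iff_some _ _).1 (hPre k hkC hklive).1
    by_cases hall : ss.all d.contains = true
    · exact ⟨k, ss, PySem.Dict.mem_items_of_get?_eq_some _ hget, hk, hall⟩
    · exfalso
      have : ∃ s ∈ ss, d.contains s = false := by
        by_contra hno
        apply hall
        rw [List.all_eq_true]
        intro s hs
        cases h : d.contains s
        · exact absurd ⟨s, hs, h⟩ hno
        · rfl
      obtain ⟨s, hsmem, hsf⟩ := this
      have hs : s ∈ pvLsucc (PySem.Dict.ofList S) (PySem.Dict.ofList V) k := by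
        rw [pvLsucc, if_neg (by rw [hklive]; simp),
          PySem.Dict.getD_of_get?_eq_some _ _ hget]
        exact hsmem
      have hsl : (PySem.Dict.ofList V).contains s = false :=
        pv_contains_live node S V hInv hsf
      have := pv_lm_lt node S V hPre hkC hs hsl
      omega
  | succ L ihL =>
    intro k hkC hklive hlm hk
    obtain ⟨ss, hget⟩ := (pv_contains_iff_some _ _).1 (hPre k hkC hklive).1
    by_cases hall : ss.all d.contains = true
    · exact ⟨k, ss, PySem.Dict.mem_items_of_get?_eq_some _ hget, hk, hall⟩
    · have : ∃ s ∈ ss, d.contains s = false := by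
        by_contra hno
        apply hall
        rw [List.all_eq_true]
        intro s hs
        cases h : d.contains s
        · exact absurd ⟨s, hs, h⟩ hno
        · rfl
      obtain ⟨s, hsmem, hsf⟩ := this
      have hs : s ∈ pvLsucc (PySem.Dict.ofList S) (PySem.Dict.ofList V) k := by
        rw [pvLsucc, if_neg (by rw [hklive]; simp),
          PySem.Dict.getD_of_get?_eq_some _ _ hget]
        exact hsmem
      have hsl : (PySem.Dict.ofList V).contains s = false :=
        pv_contains_live node S V hInv hsf
      have hsC : s ∈ pvClosure node S V := pv_closure_closed node S V hkC hs
      have := pv_lm_lt node S V hPre hkC hs hsl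
      exact ihL s hsC hsl (by omega) hsf

theorem pv_runB_correct (node : Int) (S : List (Int × List Int)) (V : List (Int × Int))
    (hPre : Pre_dfs_mem node S V) :
    ∀ f c d, pvInv node S V d → pvLevel node S V c d → 1 ≤ f →
      pvLm node S V + 2 ≤ c + f →
      runB (PySem.Dict.ofList S) f node d = pvTrue node S V := by
  intro f
  induction f with
  | zero => intro c d _ _ h; omega
  | succ f ih =>
    intro c d hInv hlev _ hcf
    by_cases hc : d.contains node = true
    · have hstep : runB (PySem.Dict.ofList S) (f + 1) node d = d.getD node 0 := by
        simp [runB, hc]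
      rw [hstep]
      exact pv_getD_inv node S V hInv hc (Or.inr (pv_closure_self node S V))
    · have hcf0 : d.contains node = false := by
        cases h : d.contains node
        · rfl
        · exact absurd h hc
      have hlive : (PySem.Dict.ofList V).contains node = false :=
        pv_contains_live node S V hInv hcf0
      have hclm : c ≤ pvLm node S V := by
        by_contra hlt
        have := hlev node (pv_closure_self node S V) hlive (by omega)
        rw [hcf0] at this; cases this
      obtain ⟨k', ss, hmem, hk'f, hall⟩ :=
        pv_exists_ready node S V hPre d hInv (pvLm node S V) node
          (pv_closure_self node S V) hlive (le_refl _) hcf0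
      have hk'res : (roundB (PySem.Dict.ofList S).items (d, false)).1.contains k' = true :=
        pv_round_resolves _ (d, false) k' ss hmem hall
      have hflag : (roundB (PySem.Dict.ofList S).items (d, false)).2 = true := by
        cases hfl : (roundB (PySem.Dict.ofList S).items (d, false)).2
        · exfalso
          have := pv_round_flag _ (d, false) hfl
          rw [this] at hk'res
          rw [hk'res] at hk'f
          cases hk'f
        · rfl
      have hstep : runB (PySem.Dict.ofList S) (f + 1) node d =
          (if (roundB (PySem.Dict.ofList S).items (d, false)).2 then
            runB (PySem.Dict.ofList S) f node (roundB (PySem.Dict.ofList S).items (d, false)).1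
          else 0) := by
        simp [runB, hc]
      rw [hstep, hflag, if_pos rfl]
      apply ih (c + 1)
      · exact pv_round_inv node S V hPre _ (fun p hp => hp) (d, false) hInv
      · exact pv_round_level node S V hPre (d, false) hInv c hlev
      · omega
      · omega

-- ===== VERDICT (by name: the statement is the Claim_ definition above) =====
theorem dfs_mem_spec : Claim_equal_dfs_mem := by
  unfold Claim_equal_dfs_mem
  intro node S V _ hPre
  unfold Spec_dfs_mem dfs_mem dfs_mem_alt
  have hBle : pvB node S V ≤ S.length + 2 := by
    by_cases hdead : (PySem.Dict.ofList V).contains node = true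
    · rw [pvB, if_pos hdead]; omega
    · rw [pvB, if_neg hdead]
      have := pv_lm_le node S V hPre (pv_closure_self node S V)
      omega
  have hA := pv_dfsA_correct node S V hPre (S.length + 2) node (PySem.Dict.ofList V)
    (pv_closure_self node S V) (pv_inv_init node S V) hBle
  have hlev0 : pvLevel node S V 0 (PySem.Dict.ofList V) := by
    intro k _ _ h; omega
  have hlm := pv_lm_le node S V hPre (pv_closure_self node S V)
  have hB := pv_runB_correct node S V hPre (S.length + 2) 0 (PySem.Dict.ofList V)
    (pv_inv_init node S V) hlev0 (by omega) (by omega)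
  rw [hA.1, hB]
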